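-- pv_equiv track=rewrite | github.com/lschaerfen/intron_sortseq | sort_src/fold_utils.py | generate_point_mutations
-- ===== SOURCE A (Python) =====
-- from itertools import combinations, product
--
-- def generate_point_mutations(full_stem, fw, n):
--     bases = ['A', 'U', 'C', 'G']
--     full_stem = list(full_stem)
--
--     # Get indices of mutable positions
--     n_indices = [i for i, c in enumerate(fw) if c == 'N']
--     if n > len(n_indices):
--         raise ValueError("n is greater than the number of mutable positions.")
--
--     mutated_seqs = []
--
--     # All combinations of n positions
--     for pos_combo in combinations(n_indices, n):
--         # For each position, determine the 3 alternative bases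
--         alt_bases_list = []
--         for i in pos_combo:
--             current_base = full_stem[i]
--             alt_bases = [b for b in bases if b != current_base]
--             alt_bases_list.append(alt_bases)
--
--         # Cartesian product of alternative bases for all positions
--         for replacements in product(*alt_bases_list):
--             mutant = full_stem.copy()
--             for i, new_base in zip(pos_combo, replacements):
--                 mutant[i] = new_base
--             mutated_seqs.append(''.join(mutant))
--
--     return(mutated_seqs)
-- ===== SOURCE B (Python) =====
-- def generate_point_mutations(full_stem, fw, n):
--     n_indices = [i for i, c in enumerate(fw) if c == 'N']
--     if n > len(n_indices):
--         raise ValueError("n is greater than the number of mutable positions.")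
--
--     chars = list(full_stem)
--     out = []
--
--     # Backtracking expansion of one chosen set of positions: mutate in place,
--     # recurse, restore. Bases tried in the fixed A,U,C,G order minus the original.
--     def expand(combo):
--         if not combo:
--             out.append(''.join(chars))
--             return
--         i = combo[0]
--         original = chars[i]
--         for b in 'AUCG':
--             if b != original:
--                 chars[i] = b
--                 expand(combo[1:])
--         chars[i] = original
--
--     # Recursive lexicographic choice of k positions from rem (include head, then skip it).
--     def choose(rem, k, acc):
--         if k == 0:
--             expand(acc)
--         elif len(rem) >= k:
--             choose(rem[1:], k - 1, acc + [rem[0]])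
--             choose(rem[1:], k, acc)
--
--     choose(n_indices, n, [])
--     return out
-- ===== Notes on version B (the rewrite author's own statement) =====
-- stated objective: alternative
-- what changed: Replaces itertools.combinations + per-combo alt-base lists + itertools.product + full-copy patching with two recursive backtracking helpers: a lexicographic position chooser and an in-place mutate/restore expander over a single character buffer.
import Mathlib
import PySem

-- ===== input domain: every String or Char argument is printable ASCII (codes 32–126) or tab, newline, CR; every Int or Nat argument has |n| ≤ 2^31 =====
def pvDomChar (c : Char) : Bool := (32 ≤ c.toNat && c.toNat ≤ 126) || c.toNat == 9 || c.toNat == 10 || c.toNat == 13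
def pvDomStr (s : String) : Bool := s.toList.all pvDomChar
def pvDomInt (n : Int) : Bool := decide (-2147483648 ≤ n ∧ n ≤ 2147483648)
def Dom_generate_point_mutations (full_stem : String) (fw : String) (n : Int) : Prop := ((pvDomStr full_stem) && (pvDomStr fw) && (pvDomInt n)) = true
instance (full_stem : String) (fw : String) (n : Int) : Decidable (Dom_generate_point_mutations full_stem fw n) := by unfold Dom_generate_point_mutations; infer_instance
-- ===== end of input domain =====

-- B replaces itertools.combinations/product + full-copy patching by two recursive
-- backtracking helpers over one character buffer (alternative decomposition, same cost).

-- the identical one-liner of both Pythons: [i for i, c in enumerate(fw) if c == 'N']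
def pvNIdx (fw : String) : List Nat :=
  ((PySem.List.enumerate fw.toList 0).filter (fun p => p.2 == 'N')).map (fun p => p.1.toNat)

-- ===== PORT A =====
-- itertools.combinations(l, k) in its documented lexicographic order
def pvCombosA (l : List Nat) (k : Nat) : List (List Nat) :=
  match k, l with
  | 0, _ => [[]]
  | _+1, [] => []
  | k+1, x :: xs => ((pvCombosA xs k).map (fun c => x :: c)) ++ pvCombosA xs (k+1)

-- itertools.product(*ls) (last list varies fastest)
def pvProdA (ls : List (List Char)) : List (List Char) :=
  match ls with
  | [] => [[]]
  | l :: rest => l.flatMap (fun b => (pvProdA rest).map (fun t => b :: t))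

def generate_point_mutations (full_stem : String) (fw : String) (n : Int) : List String :=
  let fs := full_stem.toList
  let n_indices := pvNIdx fw
  if n > (n_indices.length : Int) then []   -- Python raises ValueError here: excluded by Pre_
  else
    (pvCombosA n_indices n.toNat).flatMap (fun pos_combo =>
      let alt_bases_list := pos_combo.map (fun i =>
        ['A', 'U', 'C', 'G'].filter (fun b => b ≠ fs.getD i ' '))
      (pvProdA alt_bases_list).map (fun replacements =>
        String.mk ((pos_combo.zip replacements).foldl (fun m p => m.set p.1 p.2) fs)))

-- ===== PORT B =====
-- Source B's expand: the in-place mutate/restore becomes a functional set (restore is implicit)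
def pvExpandB (seq : List Char) (combo : List Nat) : List String :=
  match combo with
  | [] => [String.mk seq]
  | i :: rest =>
    let original := seq.getD i ' '
    ['A', 'U', 'C', 'G'].flatMap (fun b =>
      if b ≠ original then pvExpandB (seq.set i b) rest else [])

-- Source B's choose(rem, k, acc)
def pvChooseB (chars : List Char) (rem : List Nat) (k : Nat) (acc : List Nat) : List String :=
  match k, rem with
  | 0, _ => pvExpandB chars acc
  | _+1, [] => []
  | k+1, x :: rest =>
    if rest.length + 1 ≥ k + 1 then
      pvChooseB chars rest k (acc ++ [x]) ++ pvChooseB chars rest (k+1) acc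
    else []

def generate_point_mutations_alt (full_stem : String) (fw : String) (n : Int) : List String :=
  let n_indices := pvNIdx fw
  if n > (n_indices.length : Int) then []   -- Source B raises ValueError here: excluded by Pre_
  else pvChooseB full_stem.toList n_indices n.toNat []

-- ===== PRECONDITION & SPEC =====
-- Pre_ excludes exactly the inputs where Python A raises: n < 0 (ValueError from
-- combinations), n > number of 'N' positions (explicit ValueError), and n ≥ 1 with
-- some 'N' position beyond the end of full_stem (IndexError on full_stem[i]).
def Pre_generate_point_mutations (full_stem : String) (fw : String) (n : Int) : Prop :=
  0 ≤ n ∧ n ≤ ((pvNIdx fw).length : Int) ∧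
    (n = 0 ∨ ∀ i ∈ pvNIdx fw, i < full_stem.toList.length)
instance (full_stem : String) (fw : String) (n : Int) : Decidable (Pre_generate_point_mutations full_stem fw n) := by unfold Pre_generate_point_mutations; infer_instance

def pvWitness_generate_point_mutations : String × String × Int := ("GC", "NN", 1)

def Spec_generate_point_mutations (full_stem : String) (fw : String) (n : Int) (out : List String) : Prop := out = generate_point_mutations_alt full_stem fw n
instance (full_stem : String) (fw : String) (n : Int) (out : List String) : Decidable (Spec_generate_point_mutations full_stem fw n out) := by unfold Spec_generate_point_mutations; infer_instance

-- ===== CLAIM (what is proved, stated in full; the proofs are below) =====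
def Claim_equal_generate_point_mutations : Prop := ∀ (full_stem : String) (fw : String) (n : Int), Dom_generate_point_mutations full_stem fw n → Pre_generate_point_mutations full_stem fw n → Spec_generate_point_mutations full_stem fw n (generate_point_mutations full_stem fw n)

-- ===== LEMMAS AND PROOFS =====

theorem pvCombosA_nil_of_short (l : List Nat) (k : Nat) (h : l.length < k) :
    pvCombosA l k = [] := by
  induction l generalizing k with
  | nil => cases k with
    | zero => omega
    | succ k => simp [pvCombosA]
  | cons x xs ih =>
    cases k with
    | zero => omega
    | succ k =>
      simp only [pvCombosA]
      rw [ih k (by simpa using h), ih (k+1) (by simp at h ⊢; omega)]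
      simp

-- Source B's choose = itertools.combinations followed by expand, combo by combo
theorem pvChooseB_eq (chars : List Char) (rem : List Nat) (k : Nat) (acc : List Nat) :
    pvChooseB chars rem k acc
      = (pvCombosA rem k).flatMap (fun c => pvExpandB chars (acc ++ c)) := by
  induction rem generalizing k acc with
  | nil =>
    cases k with
    | zero => simp [pvChooseB, pvCombosA]
    | succ k => simp [pvChooseB, pvCombosA]
  | cons x rest ih =>
    cases k with
    | zero => simp [pvChooseB, pvCombosA]
    | succ k =>
      simp only [pvChooseB]
      by_cases h : rest.length + 1 ≥ k + 1
      · rw [if_pos h, ih, ih]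
        simp only [pvCombosA, List.flatMap_append, List.flatMap_map]
        congr 1
        apply List.flatMap_congr
        intro c _
        simp
      · rw [if_neg h]
        have h1 : pvCombosA rest k = [] := pvCombosA_nil_of_short _ _ (by omega)
        have h2 : pvCombosA rest (k+1) = [] := pvCombosA_nil_of_short _ _ (by omega)
        simp [pvCombosA, h1, h2]

theorem pvFlatMap_if_filter {α β : Type} (l : List α) (p : α → Prop) [DecidablePred p]
    (g : α → List β) :
    l.flatMap (fun b => if p b then g b else [])
      = (l.filter (fun b => decide (p b))).flatMap g := by
  induction l with
  | nil => rfl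
  | cons x xs ih => by_cases h : p x <;> simp [h, ih]

-- Source B's expand = A's per-combo product of alternative bases, applied by foldl-patching,
-- provided the combo's positions are distinct and seq still carries fs's original bases there
theorem pvExpandB_eq (fs : List Char) (combo : List Nat) (seq : List Char)
    (hnd : combo.Nodup)
    (hagree : ∀ j ∈ combo, seq.getD j ' ' = fs.getD j ' ') :
    pvExpandB seq combo
      = (pvProdA (combo.map (fun i => ['A', 'U', 'C', 'G'].filter (fun b => b ≠ fs.getD i ' ')))).map
          (fun repl => String.mk ((combo.zip repl).foldl (fun m p => m.set p.1 p.2) seq)) := by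
  induction combo generalizing seq with
  | nil => simp [pvExpandB, pvProdA]
  | cons i rest ih =>
    have hi : seq.getD i ' ' = fs.getD i ' ' := hagree i (by simp)
    have hir : i ∉ rest := (List.nodup_cons.mp hnd).1
    have hndr : rest.Nodup := (List.nodup_cons.mp hnd).2
    simp only [pvExpandB, List.map_cons, pvProdA, hi]
    rw [pvFlatMap_if_filter (p := fun b => b ≠ fs.getD i ' ') (g := fun b => pvExpandB (seq.set i b) rest)]
    rw [List.map_flatMap]
    apply List.flatMap_congr
    intro b _
    have hagree' : ∀ j ∈ rest, (seq.set i b).getD j ' ' = fs.getD j ' ' := by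
      intro j hj
      have hji : i ≠ j := fun e => hir (e ▸ hj)
      rw [List.getD_eq_getElem?_getD, List.getElem?_set_ne hji,
        ← List.getD_eq_getElem?_getD]
      exact hagree j (List.mem_cons_of_mem _ hj)
    rw [ih (seq.set i b) hndr hagree', List.map_map]
    apply List.map_congr_left
    intro t _
    simp

-- each combo produced by pvCombosA is a sublist of the index list
theorem pvCombosA_sublist (l : List Nat) (k : Nat) (c : List Nat)
    (hc : c ∈ pvCombosA l k) : c.Sublist l := by
  induction l generalizing k c with
  | nil =>
    cases k with
    | zero => simp [pvCombosA] at hc; simp [hc]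
    | succ k => simp [pvCombosA] at hc
  | cons x xs ih =>
    cases k with
    | zero => simp [pvCombosA] at hc; simp [hc]
    | succ k =>
      simp only [pvCombosA, List.mem_append, List.mem_map] at hc
      rcases hc with ⟨c', hc', rfl⟩ | hc
      · exact List.Sublist.cons₂ x (ih k c' hc')
      · exact List.Sublist.cons x (ih (k+1) c hc)

-- the 'N' positions are strictly increasing, hence duplicate-free
theorem pvNIdx_nodup (fw : String) : (pvNIdx fw).Nodup := by
  have h1 : (PySem.List.enumerate fw.toList 0).Pairwise (fun p q => p.1 < q.1) :=
    PySem.List.pairwise_lt_enumerate _ _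
  have h0 : ∀ p ∈ PySem.List.enumerate fw.toList 0, 0 ≤ p.1 := by
    intro p hp
    rcases (PySem.List.mem_enumerate_iff _ _ _).mp hp with ⟨k, hk, rfl⟩
    simp
  have h2 := h1.filter (fun p => p.2 == 'N')
  unfold pvNIdx
  rw [List.nodup_iff_pairwise_ne, List.pairwise_map]
  refine h2.imp_of_mem ?_
  intro a b ha hb hab
  have ha0 := h0 a (List.mem_of_mem_filter ha)
  have hb0 := h0 b (List.mem_of_mem_filter hb)
  omega

-- ===== VERDICT (by name: the statement is the Claim_ definition above) =====
theorem generate_point_mutations_spec : Claim_equal_generate_point_mutations := by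
  intro full_stem fw n _ _
  unfold Spec_generate_point_mutations
  unfold generate_point_mutations generate_point_mutations_alt
  simp only []
  by_cases hg : n > ((pvNIdx fw).length : Int)
  · rw [if_pos hg, if_pos hg]
  · rw [if_neg hg, if_neg hg, pvChooseB_eq]
    apply List.flatMap_congr
    intro c hc
    have hnd : c.Nodup := (pvCombosA_sublist _ _ _ hc).nodup (pvNIdx_nodup fw)
    rw [List.nil_append,
      pvExpandB_eq full_stem.toList c full_stem.toList hnd (fun _ _ => rfl)]
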